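-- pv_equiv track=rewrite | github.com/KimJonghoSNU/Abstraction_gap | scripts/analysis/analyze_round6_reseat_gold_gain.py | _count_pool_gold_hits
-- ===== SOURCE A (Python) =====
-- from typing import Any, Dict, List, Sequence, Set, Tuple
--
-- def _is_prefix(prefix: Sequence[int], full: Sequence[int]) -> bool:
--     prefix_t = tuple(prefix)
--     full_t = tuple(full)
--     return len(prefix_t) <= len(full_t) and full_t[: len(prefix_t)] == prefix_t
--
-- def _count_pool_gold_hits(
--     selected_branches: Sequence[Tuple[int, ...]],
--     cumulative_reached_leaves: Set[Tuple[int, ...]],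
--     gold_paths: Sequence[Tuple[int, ...]],
-- ) -> int:
--     hits = 0
--     for gold_path in gold_paths:
--         if gold_path in cumulative_reached_leaves:
--             hits += 1
--             continue
--         if any(_is_prefix(branch_path, gold_path) for branch_path in selected_branches):
--             hits += 1
--     return hits
-- ===== SOURCE B (Python) =====
-- def _count_pool_gold_hits(selected_branches, cumulative_reached_leaves, gold_paths):
--     leaves = {tuple(p) for p in cumulative_reached_leaves}
--     branches = {tuple(b) for b in selected_branches}
--     lengths = {len(b) for b in branches}
--     hits = 0
--     for gold_path in gold_paths:
--         g = tuple(gold_path)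
--         if g in leaves or any(k <= len(g) and g[:k] in branches for k in lengths):
--             hits += 1
--     return hits
-- ===== Notes on version B (the rewrite author's own statement) =====
-- stated objective: faster
-- what changed: B hashes the branches into a set once and, for each gold path, tests only the prefixes whose length occurs among the branches for membership, instead of A's per-gold-path scan over all branches with an O(L) prefix compare.
import Mathlib
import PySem

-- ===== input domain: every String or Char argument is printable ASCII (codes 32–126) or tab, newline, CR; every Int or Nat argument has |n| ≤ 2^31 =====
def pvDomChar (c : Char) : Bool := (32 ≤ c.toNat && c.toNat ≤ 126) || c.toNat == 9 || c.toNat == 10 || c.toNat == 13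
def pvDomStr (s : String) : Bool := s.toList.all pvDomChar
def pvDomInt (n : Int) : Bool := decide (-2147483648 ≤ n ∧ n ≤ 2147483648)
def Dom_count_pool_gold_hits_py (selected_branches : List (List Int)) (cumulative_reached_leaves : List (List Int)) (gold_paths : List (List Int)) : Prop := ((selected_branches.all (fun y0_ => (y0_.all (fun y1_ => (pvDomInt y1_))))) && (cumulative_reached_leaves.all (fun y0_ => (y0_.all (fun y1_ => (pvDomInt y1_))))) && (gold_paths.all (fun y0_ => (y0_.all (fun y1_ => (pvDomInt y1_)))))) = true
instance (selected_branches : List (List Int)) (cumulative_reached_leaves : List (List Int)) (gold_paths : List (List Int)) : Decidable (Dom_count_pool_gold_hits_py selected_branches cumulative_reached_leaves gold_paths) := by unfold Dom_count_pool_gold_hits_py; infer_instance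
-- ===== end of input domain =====

-- B replaces A's per-gold-path scan over all branches with a branch set built
-- once and a membership test of each gold path's prefixes (objective: faster).
-- ===== PORT A =====
def is_prefix_py (pfx full : List Int) : Bool :=
  decide (pfx.length ≤ full.length) && (full.take pfx.length == pfx)

def count_pool_gold_hits_py (selected_branches : List (List Int)) (cumulative_reached_leaves : List (List Int)) (gold_paths : List (List Int)) : Int :=
  gold_paths.foldl (fun hits gold_path =>
    if PySem.Set.contains cumulative_reached_leaves gold_path then hits + 1
    else if selected_branches.any (fun branch_path => is_prefix_py branch_path gold_path) then hits + 1
    else hits) 0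

-- ===== PORT B =====
def count_pool_gold_hits_py_alt (selected_branches : List (List Int)) (cumulative_reached_leaves : List (List Int)) (gold_paths : List (List Int)) : Int :=
  let leaves := PySem.Set.ofList cumulative_reached_leaves
  let branches := PySem.Set.ofList selected_branches
  let lengths := PySem.Set.ofList (branches.map List.length)
  gold_paths.foldl (fun hits g =>
    if PySem.Set.contains leaves g
        || lengths.any (fun k => decide (k ≤ g.length) && PySem.Set.contains branches (g.take k))
    then hits + 1 else hits) 0

-- ===== PRECONDITION & SPEC =====
def Spec_count_pool_gold_hits_py (selected_branches : List (List Int)) (cumulative_reached_leaves : List (List Int)) (gold_paths : List (List Int)) (out : Int) : Prop := out = count_pool_gold_hits_py_alt selected_branches cumulative_reached_leaves gold_paths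
instance (selected_branches : List (List Int)) (cumulative_reached_leaves : List (List Int)) (gold_paths : List (List Int)) (out : Int) : Decidable (Spec_count_pool_gold_hits_py selected_branches cumulative_reached_leaves gold_paths out) := by unfold Spec_count_pool_gold_hits_py; infer_instance

-- ===== CLAIM =====
def Claim_equal_count_pool_gold_hits_py : Prop := ∀ (selected_branches : List (List Int)) (cumulative_reached_leaves : List (List Int)) (gold_paths : List (List Int)), Dom_count_pool_gold_hits_py selected_branches cumulative_reached_leaves gold_paths → Spec_count_pool_gold_hits_py selected_branches cumulative_reached_leaves gold_paths (count_pool_gold_hits_py selected_branches cumulative_reached_leaves gold_paths)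

-- ===== LEMMAS AND PROOFS =====
-- A branch is a prefix of g  ↔  for some length k occurring among the branches
-- with k ≤ |g|, the prefix g.take k is in the branch set.
theorem hit_cond_eq (sb leaves : List (List Int)) (g : List Int) :
    (PySem.Set.contains leaves g
      || sb.any (fun b => is_prefix_py b g))
    = (PySem.Set.contains (PySem.Set.ofList leaves) g
      || (PySem.Set.ofList ((PySem.Set.ofList sb).map List.length)).any
          (fun k => decide (k ≤ g.length) && PySem.Set.contains (PySem.Set.ofList sb) (g.take k))) := by
  apply Bool.eq_iff_iff.mpr
  simp only [Bool.or_eq_true, PySem.Set.contains_iff, PySem.Set.mem_ofList,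
    List.any_eq_true, List.mem_map, is_prefix_py, Bool.and_eq_true, decide_eq_true_eq,
    beq_iff_eq]
  constructor
  · rintro (h | ⟨b, hb, hlen, htake⟩)
    · left; exact h
    · right
      refine ⟨b.length, ⟨b, hb, rfl⟩, hlen, ?_⟩
      rw [htake]; exact hb
  · rintro (h | ⟨k, _, hk, hmem⟩)
    · left; exact h
    · right
      have hlen : (g.take k).length = k := by
        simp [Nat.min_eq_left hk]
      exact ⟨g.take k, hmem, by omega, by rw [hlen]⟩

-- ===== VERDICT =====
theorem count_pool_gold_hits_py_spec : Claim_equal_count_pool_gold_hits_py := by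
  intro sb leaves golds _
  unfold Spec_count_pool_gold_hits_py count_pool_gold_hits_py count_pool_gold_hits_py_alt
  apply PySem.List.foldl_congr_mem
  intro hits g _
  have h := hit_cond_eq sb leaves g
  rcases hl : PySem.Set.contains leaves g <;>
  rcases hb : sb.any (fun b => is_prefix_py b g) <;>
    simp_all
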